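-- pv_equiv track=rewrite | github.com/JX-Wang/Valid_DNS_verification | obtaining_tld_ns/obtaining_tlds_ns_from_zone.py | get_tld_ns_ip
-- ===== SOURCE A (Python) =====
-- from collections import defaultdict
--
-- def get_tld_ns_ip(tlds,zone_data):
--     """
--     处理从root.zone得到的数据，以tld为key构建字典，并通过字典的key值检索将相关联的数据整理出来
--     """
--     tld_data = []
--     tld_result =[]
--     for i in zone_data:
--         a = i.split('\t')  # 去除换行符
--         b = [x.strip() for x in a if x.strip() != '']  # 去除空字符
--         b[0] = b[0][:-1]    # 去除顶级域名最后的点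
--         tld_data.append(b)  # 按行记录到tld_data中
--     data_ns = defaultdict(list)
--     data_ipv4 = defaultdict(list)
--     data_ipv6 = defaultdict(list)
--     # 构建三个字典，分别存储NS,A,AAAA记录
--     for data in tld_data:
--         if data[3] == 'NS':
--             data[4] = data[4][:-1]
--             data_ns.setdefault(data[0], []).append(data[4])
--         elif data[3] == 'A':
--             data_ipv4.setdefault(data[0], []).append(data[4])
--         elif data[3] == 'AAAA':
--             data_ipv6.setdefault(data[0], []).append(data[4])
--     # 先得到tld的ns记录列表，以ns记录为key值检索A和AAAA字典，得到相应数据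
--     for tld in tlds:
--         ns_list = list(data_ns[tld])
--         # ns_str = ';'.join(ns_list)
--         ipv4_list = []
--         ipv6_list = []
--         for ns in ns_list:
--             ipv4 = list(data_ipv4[ns])
--             ipv4 = ';'.join(ipv4)
--             ipv4_list.append(ipv4)
--         for ns in ns_list:
--             ipv6 = list(data_ipv6[ns])
--             ipv6 = ';'.join(ipv6)
--             ipv6_list.append(ipv6)
--         # ipv4_str = ';'.join(ipv4_list)
--         # ipv6_str = ';'.join(ipv6_list)
--         tld_result.append((tld, ns_list, ipv4_list, ipv6_list))
--     return tld_result
-- ===== SOURCE B (Python) =====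
-- def get_tld_ns_ip(tlds, zone_data):
--     """
--     Same parse pass as the original; then, instead of building three
--     defaultdict indexes, answer each lookup by a direct linear scan of
--     the parsed rows (alternative decomposition, no dictionaries).
--     """
--     tld_data = []
--     for i in zone_data:
--         a = i.split('\t')
--         b = [x.strip() for x in a if x.strip() != '']
--         b[0] = b[0][:-1]
--         tld_data.append(b)
--     tld_result = []
--     for tld in tlds:
--         ns_list = [row[4][:-1] for row in tld_data if row[3] == 'NS' and row[0] == tld]
--         ipv4_list = [';'.join(row[4] for row in tld_data if row[3] == 'A' and row[0] == ns)
--                      for ns in ns_list]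
--         ipv6_list = [';'.join(row[4] for row in tld_data if row[3] == 'AAAA' and row[0] == ns)
--                      for ns in ns_list]
--         tld_result.append((tld, ns_list, ipv4_list, ipv6_list))
--     return tld_result
-- ===== Notes on version B (the rewrite author's own statement) =====
-- stated objective: alternative
-- what changed: Keeps the parse pass but drops the three defaultdict indexes entirely: each TLD's NS list and each NS's A/AAAA joins are produced by direct linear scans (filters) of the parsed rows.
import Mathlib
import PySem

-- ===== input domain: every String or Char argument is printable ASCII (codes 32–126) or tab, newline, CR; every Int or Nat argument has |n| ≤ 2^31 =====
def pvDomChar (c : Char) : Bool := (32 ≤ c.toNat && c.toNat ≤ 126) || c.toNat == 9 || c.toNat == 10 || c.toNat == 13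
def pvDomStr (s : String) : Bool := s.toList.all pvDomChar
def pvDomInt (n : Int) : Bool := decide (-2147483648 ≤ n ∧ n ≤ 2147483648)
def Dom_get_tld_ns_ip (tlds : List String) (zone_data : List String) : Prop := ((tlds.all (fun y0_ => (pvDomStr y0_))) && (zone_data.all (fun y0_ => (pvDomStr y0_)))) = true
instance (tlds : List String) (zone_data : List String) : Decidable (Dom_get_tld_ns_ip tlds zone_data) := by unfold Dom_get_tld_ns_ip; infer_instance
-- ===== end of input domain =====

-- B replaces A's three defaultdict indexes by direct linear scans of the parsed rows
-- (alternative decomposition, same parse pass, identical return value; no speed claim).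

-- ===== PORT A =====

-- s[:-1]  (drop the trailing character; '' stays '')
def pvDropLastChar (s : String) : String :=
  String.ofList (PySem.Chars.slice s.toList none (some (-1)))

-- one iteration of the first loop: a = i.split('\t'); b = [x.strip() for x in a if x.strip() != '']; b[0] = b[0][:-1]
-- (split? with the nonempty literal separator "\t" never returns none; b[0] is in range under Pre_)
def pvParseRow (i : String) : List String :=
  let a := (PySem.Str.split? i "\t").getD []
  let b := (a.map PySem.Str.strip).filter (fun x => x != "")
  PySem.List.pySetD b 0 (pvDropLastChar (b.getD 0 ""))

-- the first loop: tld_data.append(b) for each line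
def pvParse (zone_data : List String) : List (List String) :=
  zone_data.foldl (fun acc i => acc ++ [pvParseRow i]) []

-- one iteration of A's dict-building loop over tld_data (the if/elif chain;
-- setdefault(k, []).append(v) is d[k] = d.get(k, []) + [v], i.e. Dict.modify; data[3]/data[4] in range under Pre_)
def pvBuildStep (s : PySem.Dict String (List String) × PySem.Dict String (List String) × PySem.Dict String (List String))
    (r : List String) :
    PySem.Dict String (List String) × PySem.Dict String (List String) × PySem.Dict String (List String) :=
  if r.getD 3 "" == "NS" then
    (s.1.modify (r.getD 0 "") [] (· ++ [pvDropLastChar (r.getD 4 "")]), s.2.1, s.2.2)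
  else if r.getD 3 "" == "A" then
    (s.1, s.2.1.modify (r.getD 0 "") [] (· ++ [r.getD 4 ""]), s.2.2)
  else if r.getD 3 "" == "AAAA" then
    (s.1, s.2.1, s.2.2.modify (r.getD 0 "") [] (· ++ [r.getD 4 ""]))
  else s

def get_tld_ns_ip (tlds : List String) (zone_data : List String) :
    List (String × List String × List String × List String) :=
  let tld_data := pvParse zone_data
  let ds := tld_data.foldl pvBuildStep (PySem.Dict.empty, PySem.Dict.empty, PySem.Dict.empty)
  -- defaultdict __getitem__ on a missing key returns [] (the inserted empty list): value-wise Dict.getD _ []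
  tlds.foldl (fun acc tld =>
    let ns_list := ds.1.getD tld []
    let ipv4_list := ns_list.foldl (fun a n => a ++ [PySem.Str.join ";" (ds.2.1.getD n [])]) []
    let ipv6_list := ns_list.foldl (fun a n => a ++ [PySem.Str.join ";" (ds.2.2.getD n [])]) []
    acc ++ [(tld, ns_list, ipv4_list, ipv6_list)]) []

-- ===== PORT B =====

-- [row for row in tld_data if row[3] == tag and row[0] == name]
def pvRecords (tld_data : List (List String)) (tag : String) (name : String) : List (List String) :=
  tld_data.filter (fun r => r.getD 3 "" == tag && r.getD 0 "" == name)

def get_tld_ns_ip_alt (tlds : List String) (zone_data : List String) :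
    List (String × List String × List String × List String) :=
  let tld_data := pvParse zone_data
  tlds.map (fun tld =>
    let ns_list := (pvRecords tld_data "NS" tld).map (fun r => pvDropLastChar (r.getD 4 ""))
    (tld, ns_list,
     ns_list.map (fun n => PySem.Str.join ";" ((pvRecords tld_data "A" n).map (fun r => r.getD 4 ""))),
     ns_list.map (fun n => PySem.Str.join ";" ((pvRecords tld_data "AAAA" n).map (fun r => r.getD 4 "")))))

-- ===== PRECONDITION & SPEC =====
-- Pre_ excludes exactly the inputs on which A raises IndexError: a line whose stripped
-- tab-separated fields number fewer than 4, or exactly 4 on an NS/A/AAAA record (data[4]).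
def Pre_get_tld_ns_ip (tlds : List String) (zone_data : List String) : Prop :=
  ∀ i ∈ zone_data,
    4 ≤ ((((PySem.Str.split? i "\t").getD []).map PySem.Str.strip).filter (fun x => x != "")).length ∧
    (((((PySem.Str.split? i "\t").getD []).map PySem.Str.strip).filter (fun x => x != "")).getD 3 "" = "NS" ∨
     ((((PySem.Str.split? i "\t").getD []).map PySem.Str.strip).filter (fun x => x != "")).getD 3 "" = "A" ∨
     ((((PySem.Str.split? i "\t").getD []).map PySem.Str.strip).filter (fun x => x != "")).getD 3 "" = "AAAA" →
     5 ≤ ((((PySem.Str.split? i "\t").getD []).map PySem.Str.strip).filter (fun x => x != "")).length)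
instance (tlds : List String) (zone_data : List String) : Decidable (Pre_get_tld_ns_ip tlds zone_data) := by unfold Pre_get_tld_ns_ip; infer_instance

def pvWitness_get_tld_ns_ip : List String × List String :=
  (["com", "xx"], ["com.\tIN\t200\tNS\tns1.com.", "ns1.com.\tIN\t200\tA\t1.2.3.4"])

def Spec_get_tld_ns_ip (tlds : List String) (zone_data : List String) (out : List (String × List String × List String × List String)) : Prop := out = get_tld_ns_ip_alt tlds zone_data
instance (tlds : List String) (zone_data : List String) (out : List (String × List String × List String × List String)) : Decidable (Spec_get_tld_ns_ip tlds zone_data out) := by unfold Spec_get_tld_ns_ip; infer_instance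

-- ===== CLAIM (what is proved, stated in full; the proofs are below) =====
def Claim_equal_get_tld_ns_ip : Prop := ∀ (tlds : List String) (zone_data : List String), Dom_get_tld_ns_ip tlds zone_data → Pre_get_tld_ns_ip tlds zone_data → Spec_get_tld_ns_ip tlds zone_data (get_tld_ns_ip tlds zone_data)

-- ===== LEMMAS AND PROOFS =====

-- a guarded grouping loop: looking up one key in the finished dict is the filtered map of the rows
theorem pv_getD_fold_guard {α : Type} (c : α → Bool) (k v : α → String) (rows : List α)
    (d : PySem.Dict String (List String)) (name : String) :
    (rows.foldl (fun d r => if c r then d.modify (k r) [] (· ++ [v r]) else d) d).getD name []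
      = d.getD name [] ++ ((rows.filter (fun r => c r && k r == name)).map v) := by
  induction rows generalizing d with
  | nil => simp
  | cons r t ih =>
    simp only [List.foldl_cons, List.filter_cons]
    by_cases hc : c r
    · rw [if_pos hc, ih]
      by_cases hk : k r = name
      · subst hk
        simp [hc]
      · have : (k r == name) = false := by simpa using hk
        simp [PySem.Dict.getD_modify, hc, this, Ne.symm hk]
    · have : c r = false := by simpa using hc
      simp [this, ih]

-- projections of A's three-dict fold: each component is its own guarded grouping loop
theorem pv_build_fst (rows : List (List String))
    (s : PySem.Dict String (List String) × PySem.Dict String (List String) × PySem.Dict String (List String)) :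
    (rows.foldl pvBuildStep s).1
      = rows.foldl (fun d r => if (r.getD 3 "" == "NS") then d.modify (r.getD 0 "") [] (· ++ [pvDropLastChar (r.getD 4 "")]) else d) s.1 := by
  induction rows generalizing s with
  | nil => rfl
  | cons r t ih =>
    simp only [List.foldl_cons, ih, pvBuildStep]
    split_ifs <;> rfl

theorem pv_build_snd1 (rows : List (List String))
    (s : PySem.Dict String (List String) × PySem.Dict String (List String) × PySem.Dict String (List String)) :
    (rows.foldl pvBuildStep s).2.1
      = rows.foldl (fun d r => if (r.getD 3 "" == "A") then d.modify (r.getD 0 "") [] (· ++ [r.getD 4 ""]) else d) s.2.1 := by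
  induction rows generalizing s with
  | nil => rfl
  | cons r t ih =>
    simp only [List.foldl_cons, ih, pvBuildStep]
    by_cases h3 : r.getD 3 "" = "NS" <;> by_cases h4 : r.getD 3 "" = "A" <;>
      by_cases h5 : r.getD 3 "" = "AAAA" <;> simp_all

theorem pv_build_snd2 (rows : List (List String))
    (s : PySem.Dict String (List String) × PySem.Dict String (List String) × PySem.Dict String (List String)) :
    (rows.foldl pvBuildStep s).2.2
      = rows.foldl (fun d r => if (r.getD 3 "" == "AAAA") then d.modify (r.getD 0 "") [] (· ++ [r.getD 4 ""]) else d) s.2.2 := by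
  induction rows generalizing s with
  | nil => rfl
  | cons r t ih =>
    simp only [List.foldl_cons, ih, pvBuildStep]
    by_cases h3 : r.getD 3 "" = "NS" <;> by_cases h4 : r.getD 3 "" = "A" <;>
      by_cases h5 : r.getD 3 "" = "AAAA" <;> simp_all

-- the NS component of A's dicts, read at any name, is B's filtered map
theorem pv_ns_eq (rows : List (List String)) (name : String) :
    ((rows.foldl pvBuildStep (PySem.Dict.empty, PySem.Dict.empty, PySem.Dict.empty)).1).getD name []
      = (pvRecords rows "NS" name).map (fun r => pvDropLastChar (r.getD 4 "")) := by
  rw [pv_build_fst, pv_getD_fold_guard]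
  simp [pvRecords]

theorem pv_a_eq (rows : List (List String)) (name : String) :
    ((rows.foldl pvBuildStep (PySem.Dict.empty, PySem.Dict.empty, PySem.Dict.empty)).2.1).getD name []
      = (pvRecords rows "A" name).map (fun r => r.getD 4 "") := by
  rw [pv_build_snd1, pv_getD_fold_guard]
  simp [pvRecords]

theorem pv_aaaa_eq (rows : List (List String)) (name : String) :
    ((rows.foldl pvBuildStep (PySem.Dict.empty, PySem.Dict.empty, PySem.Dict.empty)).2.2).getD name []
      = (pvRecords rows "AAAA" name).map (fun r => r.getD 4 "") := by
  rw [pv_build_snd2, pv_getD_fold_guard]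
  simp [pvRecords]

theorem pv_main (tlds : List String) (zone_data : List String) :
    get_tld_ns_ip tlds zone_data = get_tld_ns_ip_alt tlds zone_data := by
  unfold get_tld_ns_ip get_tld_ns_ip_alt
  rw [PySem.List.foldl_append_singleton_eq_map]
  simp only [List.nil_append]
  apply List.map_congr_left
  intro tld _
  rw [PySem.List.foldl_append_singleton_eq_map, PySem.List.foldl_append_singleton_eq_map]
  simp only [List.nil_append, pv_ns_eq, pv_a_eq, pv_aaaa_eq]

-- ===== VERDICT (by name: the statement is the Claim_ definition above) =====
theorem get_tld_ns_ip_spec : Claim_equal_get_tld_ns_ip := by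
  intro tlds zone_data _ _
  unfold Spec_get_tld_ns_ip
  exact pv_main tlds zone_data
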